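-- pv_equiv track=rewrite | github.com/sfendell/mealplanner | reorganize_meals.py | reorganize_meal
-- ===== SOURCE A (Python) =====
-- def reorganize_meal(meal_block):
--     """Reorganize a single meal block"""
--     lines = meal_block.strip().split("\n")
--     if not lines:
--         return meal_block
--
--     title = lines[0]
--     ingredients = lines[1:]
--
--     # Separate ingredients with and without quantities
--     with_quantities = []
--     without_quantities = []
--
--     for ingredient in ingredients:
--         ingredient = ingredient.strip()
--         if not ingredient:
--             continue
--
--         # Check if ingredient starts with a number
--         if ingredient[0].isdigit():
--             with_quantities.append(ingredient)
--         else: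
--             without_quantities.append(ingredient)
--
--     # Sort both lists alphabetically by ingredient name (after quantity)
--     def get_ingredient_name(ingredient):
--         # Remove quantity and get just the ingredient name
--         parts = ingredient.split(" ", 1)
--         if len(parts) > 1:
--             return parts[1].lower()
--         return ingredient.lower()
--
--     with_quantities.sort(key=get_ingredient_name)
--     without_quantities.sort(key=lambda x: x.lower())
--
--     # Combine: title, ingredients with quantities, then ingredients without quantities
--     result = [title]
--     result.extend(with_quantities)
--     result.extend(without_quantities)
--
--     return "\n".join(result)
-- ===== SOURCE B (Python) =====
-- def reorganize_meal(meal_block):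
--     """Reorganize a single meal block: one stable sort with a composite key."""
--     lines = meal_block.strip().split("\n")
--     title = lines[0]
--     items = [s for s in (l.strip() for l in lines[1:]) if s]
--
--     def key(s):
--         if s[0].isdigit():
--             parts = s.split(" ", 1)
--             return (0, parts[1].lower() if len(parts) > 1 else s.lower())
--         return (1, s.lower())
--
--     return "\n".join([title] + sorted(items, key=key))
-- ===== Notes on version B (the rewrite author's own statement) =====
-- stated objective: simpler
-- what changed: Replaces A's two accumulator lists, partition loop and two separate sorts with one filtered list of stripped non-empty lines and a single stable sort under a composite (priority, name) key, relying on sort stability to reproduce A's ordering.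
import Mathlib
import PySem

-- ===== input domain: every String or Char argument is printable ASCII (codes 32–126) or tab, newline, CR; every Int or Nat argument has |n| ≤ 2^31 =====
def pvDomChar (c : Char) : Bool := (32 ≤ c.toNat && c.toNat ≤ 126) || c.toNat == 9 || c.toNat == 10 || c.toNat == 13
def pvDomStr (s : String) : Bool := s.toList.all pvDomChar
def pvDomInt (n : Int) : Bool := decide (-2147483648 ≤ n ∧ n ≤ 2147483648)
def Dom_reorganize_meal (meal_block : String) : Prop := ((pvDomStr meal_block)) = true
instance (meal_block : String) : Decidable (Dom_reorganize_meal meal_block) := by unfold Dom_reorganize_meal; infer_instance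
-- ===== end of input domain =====

-- B replaces A's two-partition-lists-plus-two-sorts structure by one filtered list and a single
-- stable sort with a composite (priority, name) key; objective: simpler, same asymptotic cost.

-- shared small helpers (both Pythons contain this logic verbatim)
-- ingredient[0].isdigit() for a (possibly empty) string
def pvDigitFirst (s : String) : Bool :=
  match s.toList with
  | [] => false
  | c :: _ => PySem.Chars.isdigit c

-- parts = s.split(" ", 1); parts[1].lower() if len(parts) > 1 else s.lower()
def pvNameKey (s : String) : String :=
  match PySem.Str.splitMax? s " " 1 with
  | some parts =>
      if parts.length > 1 then PySem.Str.lower ((parts[1]?).getD "") else PySem.Str.lower s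
  | none => PySem.Str.lower s   -- unreachable: separator " " is nonempty

-- ===== PORT A =====
-- the body of A's partition loop
def pvStepA (acc : List String × List String) (ing : String) : List String × List String :=
  let s := PySem.Str.strip ing
  if s == "" then acc
  else if pvDigitFirst s then (acc.1 ++ [s], acc.2) else (acc.1, acc.2 ++ [s])

def reorganize_meal (meal_block : String) : String :=
  let lines := (PySem.Str.split? (PySem.Str.strip meal_block) "\n").getD []
  match lines with
  | [] => meal_block            -- Python's `if not lines` branch (never taken: split returns ≥ 1 piece)
  | title :: ingredients =>
    let acc := ingredients.foldl pvStepA ([], [])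
    PySem.Str.join "\n"
      ([title] ++ PySem.List.sorted acc.1 pvNameKey ++ PySem.List.sorted acc.2 PySem.Str.lower)

-- ===== PORT B =====
def reorganize_meal_alt (meal_block : String) : String :=
  let lines := (PySem.Str.split? (PySem.Str.strip meal_block) "\n").getD []
  let title := lines.headD ""   -- lines[0]; split returns ≥ 1 piece, so never the default
  let items := ((lines.drop 1).map PySem.Str.strip).filter (fun s => !(s == ""))
  PySem.Str.join "\n"
    (title :: PySem.List.sorted2 items
        (fun s => if pvDigitFirst s then (0 : Int) else 1)
        (fun s => if pvDigitFirst s then pvNameKey s else PySem.Str.lower s))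

-- ===== PRECONDITION & SPEC =====
def Spec_reorganize_meal (meal_block : String) (out : String) : Prop := out = reorganize_meal_alt meal_block
instance (meal_block : String) (out : String) : Decidable (Spec_reorganize_meal meal_block out) := by unfold Spec_reorganize_meal; infer_instance

-- ===== CLAIM (what is proved, stated in full; the proofs are below) =====
def Claim_equal_reorganize_meal : Prop := ∀ (meal_block : String), Dom_reorganize_meal meal_block → Spec_reorganize_meal meal_block (reorganize_meal meal_block)

-- ===== LEMMAS AND PROOFS =====

-- split always returns at least one piece
theorem pv_go_ne_nil (sep : List Char) : ∀ (fuel : Nat) (l cur : List Char) (acc : List (List Char)),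
    PySem.Chars.splitOn.go sep fuel l cur acc ≠ [] := by
  intro fuel
  induction fuel with
  | zero => intro l cur acc; simp [PySem.Chars.splitOn.go]
  | succ n ih =>
      intro l cur acc
      cases l with
      | nil => simp [PySem.Chars.splitOn.go]
      | cons c rest =>
          simp only [PySem.Chars.splitOn.go]
          split
          · exact ih _ _ _
          · exact ih _ _ _

theorem pv_split_ne_nil (s : String) :
    (PySem.Str.split? s "\n").getD [] ≠ [] := by
  simp [PySem.Str.split?, PySem.Chars.split?, PySem.Chars.splitOn]
  exact pv_go_ne_nil _ _ _ _ _

-- the composite comparison sorted2 uses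
def pvB2 {α : Type} (k1 : α → Int) (k2 : α → String) (a b : α) : Bool :=
  decide (k1 a < k1 b) || (!decide (k1 b < k1 a) && decide (k2 a < k2 b))

theorem pv_sorted2_eq_foldl {α : Type} (xs : List α) (k1 : α → Int) (k2 : α → String) :
    PySem.List.sorted2 xs k1 k2 = xs.foldl (fun acc x => PySem.List.insertBy (pvB2 k1 k2) x acc) [] := rfl

-- abbreviations for the instantiated keys
def pvK1 {α : Type} (p : α → Bool) (x : α) : Int := if p x then 0 else 1
def pvK2 {α : Type} (p : α → Bool) (kA kB : α → String) (x : α) : String := if p x then kA x else kB x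

theorem pvB2_tt_tt {α : Type} (p : α → Bool) (kA kB : α → String) (a b : α)
    (ha : p a = true) (hb : p b = true) :
    pvB2 (pvK1 p) (pvK2 p kA kB) a b = decide (kA a < kA b) := by
  simp [pvB2, pvK1, pvK2, ha, hb]

theorem pvB2_tt_ff {α : Type} (p : α → Bool) (kA kB : α → String) (a b : α)
    (ha : p a = true) (hb : p b = false) :
    pvB2 (pvK1 p) (pvK2 p kA kB) a b = true := by
  simp [pvB2, pvK1, pvK2, ha, hb]

theorem pvB2_ff_tt {α : Type} (p : α → Bool) (kA kB : α → String) (a b : α)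
    (ha : p a = false) (hb : p b = true) :
    pvB2 (pvK1 p) (pvK2 p kA kB) a b = false := by
  simp [pvB2, pvK1, pvK2, ha, hb]

theorem pvB2_ff_ff {α : Type} (p : α → Bool) (kA kB : α → String) (a b : α)
    (ha : p a = false) (hb : p b = false) :
    pvB2 (pvK1 p) (pvK2 p kA kB) a b = decide (kB a < kB b) := by
  simp [pvB2, pvK1, pvK2, ha, hb]

-- inserting a priority-0 element into A ++ B lands inside A (or right before B)
theorem pv_insert_left {α : Type} (p : α → Bool) (kA kB : α → String) (x : α) (hx : p x = true) :
    ∀ (A B : List α), (∀ y ∈ A, p y = true) → (∀ y ∈ B, p y = false) →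
    PySem.List.insertBy (pvB2 (pvK1 p) (pvK2 p kA kB)) x (A ++ B)
      = PySem.List.insertBy (fun a b => decide (kA a < kA b)) x A ++ B := by
  intro A
  induction A with
  | nil =>
      intro B _ hB
      cases B with
      | nil => simp [PySem.List.insertBy]
      | cons b bs =>
          simp [PySem.List.insertBy, pvB2_tt_ff p kA kB x b hx (hB b (by simp))]
  | cons a as ih =>
      intro B hA hB
      have ha : p a = true := hA a (by simp)
      simp only [List.cons_append, PySem.List.insertBy, pvB2_tt_tt p kA kB x a hx ha]
      by_cases h : kA x < kA a
      · simp [h]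
      · simp [h, ih B (fun y hy => hA y (by simp [hy])) hB]

-- inserting a priority-1 element into A ++ B skips A entirely
theorem pv_insert_right {α : Type} (p : α → Bool) (kA kB : α → String) (x : α) (hx : p x = false) :
    ∀ (A B : List α), (∀ y ∈ A, p y = true) → (∀ y ∈ B, p y = false) →
    PySem.List.insertBy (pvB2 (pvK1 p) (pvK2 p kA kB)) x (A ++ B)
      = A ++ PySem.List.insertBy (fun a b => decide (kB a < kB b)) x B := by
  intro A
  induction A with
  | nil =>
      intro B _ hB
      simp only [List.nil_append]
      induction B with
      | nil => simp [PySem.List.insertBy]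
      | cons b bs ihB =>
          have hb : p b = false := hB b (by simp)
          simp only [PySem.List.insertBy, pvB2_ff_ff p kA kB x b hx hb]
          by_cases h : kB x < kB b
          · simp [h]
          · simp [h, ihB (fun y hy => hB y (by simp [hy]))]
  | cons a as ih =>
      intro B hA hB
      have ha : p a = true := hA a (by simp)
      simp [PySem.List.insertBy, pvB2_ff_tt p kA kB x a hx ha,
            ih B (fun y hy => hA y (by simp [hy])) hB]

-- one stable insertion sort with the composite key = partition, sort each part, concatenate
theorem pv_foldl_split {α : Type} (p : α → Bool) (kA kB : α → String) :
    ∀ (xs A B : List α), (∀ y ∈ A, p y = true) → (∀ y ∈ B, p y = false) →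
    xs.foldl (fun acc x => PySem.List.insertBy (pvB2 (pvK1 p) (pvK2 p kA kB)) x acc) (A ++ B)
      = (xs.filter p).foldl (fun acc x => PySem.List.insertBy (fun a b => decide (kA a < kA b)) x acc) A
        ++ (xs.filter (fun x => !p x)).foldl (fun acc x => PySem.List.insertBy (fun a b => decide (kB a < kB b)) x acc) B := by
  intro xs
  induction xs with
  | nil => intro A B _ _; simp
  | cons x xs ih =>
      intro A B hA hB
      by_cases hx : p x = true
      · have h1 : PySem.List.insertBy (pvB2 (pvK1 p) (pvK2 p kA kB)) x (A ++ B)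
            = PySem.List.insertBy (fun a b => decide (kA a < kA b)) x A ++ B :=
          pv_insert_left p kA kB x hx A B hA hB
        have hA' : ∀ y ∈ PySem.List.insertBy (fun a b => decide (kA a < kA b)) x A, p y = true := by
          intro y hy
          rcases (PySem.List.mem_insertBy _ _ _ _).1 hy with h | h
          · simpa [h] using hx
          · exact hA y h
        simp only [List.foldl_cons, h1, List.filter_cons, hx, if_pos, Bool.not_true]
        simpa using ih _ B hA' hB
      · have hx' : p x = false := by simpa using hx
        have h1 : PySem.List.insertBy (pvB2 (pvK1 p) (pvK2 p kA kB)) x (A ++ B)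
            = A ++ PySem.List.insertBy (fun a b => decide (kB a < kB b)) x B :=
          pv_insert_right p kA kB x hx' A B hA hB
        have hB' : ∀ y ∈ PySem.List.insertBy (fun a b => decide (kB a < kB b)) x B, p y = false := by
          intro y hy
          rcases (PySem.List.mem_insertBy _ _ _ _).1 hy with h | h
          · simpa [h] using hx'
          · exact hB y h
        simp only [List.foldl_cons, h1, List.filter_cons, hx']
        simpa using ih A _ hA hB'

theorem pv_sorted2_split {α : Type} (p : α → Bool) (kA kB : α → String) (xs : List α) :
    PySem.List.sorted2 xs (pvK1 p) (pvK2 p kA kB)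
      = PySem.List.sorted (xs.filter p) kA ++ PySem.List.sorted (xs.filter (fun x => !p x)) kB := by
  rw [pv_sorted2_eq_foldl, PySem.List.sorted_eq_foldl_insertBy, PySem.List.sorted_eq_foldl_insertBy]
  simpa using pv_foldl_split p kA kB xs [] [] (by simp) (by simp)

-- A's partition loop = filter the stripped nonempty lines by leading digit
theorem pv_loopA : ∀ (ings : List String) (w wo : List String),
    ings.foldl pvStepA (w, wo)
      = (w ++ (ings.map PySem.Str.strip).filter (fun s => pvDigitFirst s && !(s == "")),
         wo ++ (ings.map PySem.Str.strip).filter (fun s => !pvDigitFirst s && !(s == ""))) := by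
  intro ings
  induction ings with
  | nil => intro w wo; simp
  | cons ing t ih =>
      intro w wo
      rw [List.foldl_cons]
      by_cases h0 : PySem.Str.strip ing == ""
      · have hstep : pvStepA (w, wo) ing = (w, wo) := by simp [pvStepA, h0]
        rw [hstep, ih]
        simp [h0]
      · by_cases hd : pvDigitFirst (PySem.Str.strip ing)
        · have hstep : pvStepA (w, wo) ing = (w ++ [PySem.Str.strip ing], wo) := by
            simp [pvStepA, h0, hd]
          rw [hstep, ih]
          simp [h0, hd]
        · have hstep : pvStepA (w, wo) ing = (w, wo ++ [PySem.Str.strip ing]) := by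
            simp [pvStepA, h0, hd]
          rw [hstep, ih]
          simp [h0, hd]

-- ===== VERDICT (by name: the statement is the Claim_ definition above) =====
theorem reorganize_meal_spec : Claim_equal_reorganize_meal := by
  intro meal_block _
  unfold Spec_reorganize_meal reorganize_meal reorganize_meal_alt
  cases hl : (PySem.Str.split? (PySem.Str.strip meal_block) "\n").getD [] with
  | nil => exact absurd hl (pv_split_ne_nil _)
  | cons title ingredients =>
      simp only [List.headD_cons, List.drop_one, List.tail_cons]
      rw [pv_loopA ingredients [] []]
      simp only [List.nil_append]
      have h := pv_sorted2_split pvDigitFirst pvNameKey PySem.Str.lower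
        ((ingredients.map PySem.Str.strip).filter (fun s => !(s == "")))
      rw [List.filter_filter, List.filter_filter] at h
      unfold pvK1 pvK2 at h
      rw [h]
      simp
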